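-- pv_equiv track=rewrite | github.com/suprim1043/DataStructures | arrays.py | ret
-- ===== SOURCE A (Python) =====
-- from collections import Counter
--
-- def ret(words1, words2):
--
--     maximum = Counter()
--     for word in words2:
--         maximum_freq = Counter(word)
--         for key,val in maximum_freq.items():
--             maximum[key] = max(maximum[key],val)
--     stack = []
--     for word in words1:
--         matching = Counter(word)
--         if all(matching[char] >= maximum[char] for char in maximum):
--             stack.append(word)
--     return stack
-- ===== SOURCE B (Python) =====
-- from collections import Counter
--
-- def ret(words1, words2):
--     # Check each candidate directly against every word in words2,
--     # instead of first aggregating a single max-requirement Counter.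
--     reqs = [Counter(w2) for w2 in words2]
--     out = []
--     for w in words1:
--         cw = Counter(w)
--         if all(cw[c] >= n for req in reqs for c, n in req.items()):
--             out.append(w)
--     return out
-- ===== Notes on version B (the rewrite author's own statement) =====
-- stated objective: alternative
-- what changed: B drops A's aggregated max-frequency Counter entirely and instead tests each words1 candidate directly against the Counter of every word in words2.
import Mathlib
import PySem

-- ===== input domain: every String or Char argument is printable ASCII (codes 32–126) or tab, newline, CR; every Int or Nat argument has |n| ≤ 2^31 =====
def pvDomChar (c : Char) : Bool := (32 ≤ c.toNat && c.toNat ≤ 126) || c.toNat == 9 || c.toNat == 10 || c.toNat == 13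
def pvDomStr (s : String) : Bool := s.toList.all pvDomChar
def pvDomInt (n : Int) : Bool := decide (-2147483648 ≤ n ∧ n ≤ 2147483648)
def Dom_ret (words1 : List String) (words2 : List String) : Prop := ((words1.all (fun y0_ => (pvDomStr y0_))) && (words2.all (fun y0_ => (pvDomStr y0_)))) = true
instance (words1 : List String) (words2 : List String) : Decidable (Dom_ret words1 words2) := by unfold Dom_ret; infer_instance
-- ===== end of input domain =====

-- B drops A's aggregated max-frequency Counter and tests each candidate directly
-- against the Counter of every word in words2 (alternative decomposition, same results).


-- ===== PORT A =====
def ret (words1 : List String) (words2 : List String) : List String :=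
  let maximum := words2.foldl
    (fun maximum word =>
      let maximum_freq := PySem.Dict.counter word.toList
      maximum_freq.items.foldl
        (fun maximum kv => maximum.insert kv.1 (max (maximum.getD kv.1 0) kv.2))
        maximum)
    PySem.Dict.empty
  words1.foldl
    (fun stack word =>
      let matching := PySem.Dict.counter word.toList
      if maximum.keys.all (fun c => decide (matching.getD c 0 ≥ maximum.getD c 0))
      then stack ++ [word] else stack)
    []

-- ===== PORT B =====
def ret_alt (words1 : List String) (words2 : List String) : List String :=
  let reqs := words2.map (fun w2 => PySem.Dict.counter w2.toList)
  words1.foldl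
    (fun out w =>
      let cw := PySem.Dict.counter w.toList
      if reqs.all (fun req => req.items.all (fun p => decide (cw.getD p.1 0 ≥ p.2)))
      then out ++ [w] else out)
    []

-- ===== PRECONDITION & SPEC =====
def Spec_ret (words1 : List String) (words2 : List String) (out : List String) : Prop := out = ret_alt words1 words2
instance (words1 : List String) (words2 : List String) (out : List String) : Decidable (Spec_ret words1 words2 out) := by unfold Spec_ret; infer_instance

-- ===== CLAIM (what is proved, stated in full; the proofs are below) =====
def Claim_equal_ret : Prop := ∀ (words1 : List String) (words2 : List String), Dom_ret words1 words2 → Spec_ret words1 words2 (ret words1 words2)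

-- ===== LEMMAS AND PROOFS =====

-- A's inner items-loop, read through getD at a fixed char c.
theorem maxStep_getD (l : List (Char × Int)) (m : PySem.Dict Char Int) (c : Char) :
    (l.foldl (fun m kv => m.insert kv.1 (max (m.getD kv.1 0) kv.2)) m).getD c 0
      = l.foldl (fun a kv => if kv.1 = c then max a kv.2 else a) (m.getD c 0) := by
  induction l generalizing m with
  | nil => rfl
  | cons kv rest ih =>
      simp only [List.foldl_cons, ih, PySem.Dict.getD_insert]
      by_cases h : c = kv.1
      · simp [h]
      · simp [h, Ne.symm h]

-- Folding the max-update over pairs (k, cnt k) for k in S.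
theorem maxFold_map (S : List Char) (cnt : Char → Int) (c : Char) (a : Int) :
    (S.map (fun k => (k, cnt k))).foldl (fun a kv => if kv.1 = c then max a kv.2 else a) a
      = if c ∈ S then max a (cnt c) else a := by
  induction S generalizing a with
  | nil => simp
  | cons k S ih =>
      simp only [List.map_cons, List.foldl_cons, List.mem_cons]
      by_cases hk : k = c
      · subst hk
        rw [if_pos rfl, ih]
        by_cases hS : k ∈ S
        · rw [if_pos hS, if_pos (Or.inl rfl), max_assoc, max_self]
        · rw [if_neg hS, if_pos (Or.inl rfl)]
      · rw [if_neg hk, ih]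
        have hck : ¬(c = k ∨ c ∈ S) ↔ ¬(c ∈ S) := by
          constructor
          · intro h hc; exact h (Or.inr hc)
          · rintro h (rfl | hc); exact hk rfl; exact h hc
        by_cases hS : c ∈ S
        · rw [if_pos hS, if_pos (Or.inr hS)]
        · rw [if_neg hS, if_neg (hck.mpr hS)]

-- One word of A's outer loop, through getD (needs a nonnegative running value).
theorem maxWord_getD (w : String) (m : PySem.Dict Char Int) (c : Char) (hm : 0 ≤ m.getD c 0) :
    ((PySem.Dict.counter w.toList).items.foldl
        (fun m kv => m.insert kv.1 (max (m.getD kv.1 0) kv.2)) m).getD c 0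
      = max (m.getD c 0) (w.toList.count c : Int) := by
  rw [maxStep_getD, PySem.Dict.items_counter, maxFold_map]
  by_cases h : c ∈ PySem.Set.ofList w.toList
  · simp [h]
  · rw [if_neg h]
    have hc : c ∉ w.toList := fun hh => h ((PySem.Set.mem_ofList _ _).mpr hh)
    rw [List.count_eq_zero.mpr hc]
    omega

theorem maximum_getD (words2 : List String) (m : PySem.Dict Char Int) (c : Char)
    (hm : 0 ≤ m.getD c 0) :
    (words2.foldl
        (fun m word => (PySem.Dict.counter word.toList).items.foldl
          (fun m kv => m.insert kv.1 (max (m.getD kv.1 0) kv.2)) m) m).getD c 0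
      = words2.foldl (fun a w2 => max a (w2.toList.count c : Int)) (m.getD c 0) := by
  induction words2 generalizing m with
  | nil => rfl
  | cons w ws ih =>
      simp only [List.foldl_cons]
      have hm' : 0 ≤ ((PySem.Dict.counter w.toList).items.foldl
          (fun m kv => m.insert kv.1 (max (m.getD kv.1 0) kv.2)) m).getD c 0 := by
        rw [maxWord_getD w m c hm]
        exact le_trans hm (le_max_left _ _)
      rw [ih _ hm', maxWord_getD w m c hm]

theorem maximum_keys (words2 : List String) (m : PySem.Dict Char Int) (c : Char) :
    c ∈ (words2.foldl
        (fun m word => (PySem.Dict.counter word.toList).items.foldl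
          (fun m kv => m.insert kv.1 (max (m.getD kv.1 0) kv.2)) m) m).keys
      ↔ c ∈ m.keys ∨ ∃ w2 ∈ words2, c ∈ w2.toList := by
  induction words2 generalizing m with
  | nil => simp
  | cons w ws ih =>
      simp only [List.foldl_cons, List.mem_cons]
      rw [ih]
      have hk := PySem.Dict.keys_foldl_insert_key (ν := Int)
        ((PySem.Dict.counter w.toList).items) (fun kv => kv.1)
        (fun d kv => max (d.getD kv.1 0) kv.2) m
      have hmap : List.map (fun kv : Char × Int => kv.1) (PySem.Dict.counter w.toList).items
          = PySem.Set.ofList w.toList := by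
        rw [PySem.Dict.items_counter]
        simp [List.map_map, Function.comp_def]
      rw [hk, hmap]
      simp only [PySem.Set.mem_update, PySem.Set.mem_ofList]
      constructor
      · rintro ((h | h) | ⟨w2, hw2, hc⟩)
        · exact Or.inl h
        · exact Or.inr ⟨w, Or.inl rfl, h⟩
        · exact Or.inr ⟨w2, Or.inr hw2, hc⟩
      · rintro (h | ⟨w2, rfl | hw2, hc⟩)
        · exact Or.inl (Or.inl h)
        · exact Or.inl (Or.inr hc)
        · exact Or.inr ⟨w2, hw2, hc⟩

theorem foldl_max_le_iff (l : List String) (c : Char) (b a : Int) :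
    l.foldl (fun a w2 => max a (w2.toList.count c : Int)) b ≤ a
      ↔ b ≤ a ∧ ∀ w2 ∈ l, (w2.toList.count c : Int) ≤ a := by
  induction l generalizing b with
  | nil => simp
  | cons w ws ih =>
      simp only [List.foldl_cons, ih, List.mem_cons]
      constructor
      · rintro ⟨h1, h2⟩
        exact ⟨le_trans (le_max_left _ _) h1,
          fun w2 hw2 => hw2.elim (fun hh => hh ▸ le_trans (le_max_right _ _) h1) (h2 w2)⟩
      · rintro ⟨h1, h2⟩
        exact ⟨max_le h1 (h2 w (Or.inl rfl)), fun w2 hw2 => h2 w2 (Or.inr hw2)⟩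

-- The two membership tests agree, word by word.
theorem cond_equiv (w : String) (words2 : List String) :
    ((words2.foldl
        (fun m word => (PySem.Dict.counter word.toList).items.foldl
          (fun m kv => m.insert kv.1 (max (m.getD kv.1 0) kv.2)) m)
        PySem.Dict.empty).keys.all
      (fun c => decide ((PySem.Dict.counter w.toList).getD c 0
        ≥ (words2.foldl
            (fun m word => (PySem.Dict.counter word.toList).items.foldl
              (fun m kv => m.insert kv.1 (max (m.getD kv.1 0) kv.2)) m)
            PySem.Dict.empty).getD c 0)))
    = (words2.map (fun w2 => PySem.Dict.counter w2.toList)).all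
        (fun req => req.items.all
          (fun p => decide ((PySem.Dict.counter w.toList).getD p.1 0 ≥ p.2))) := by
  have hget : ∀ c : Char, (words2.foldl
        (fun m word => (PySem.Dict.counter word.toList).items.foldl
          (fun m kv => m.insert kv.1 (max (m.getD kv.1 0) kv.2)) m)
        PySem.Dict.empty).getD c 0
      = words2.foldl (fun a w2 => max a (w2.toList.count c : Int)) 0 := by
    intro c
    rw [maximum_getD words2 PySem.Dict.empty c (by rw [PySem.Dict.getD_empty]),
      PySem.Dict.getD_empty]
  rw [Bool.eq_iff_iff]
  simp only [List.all_eq_true, decide_eq_true_eq, List.mem_map, PySem.Dict.getD_counter]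
  constructor
  · intro h req hreq p hp
    obtain ⟨w2, hw2, rfl⟩ := hreq
    rw [PySem.Dict.items_counter] at hp
    obtain ⟨c, hc, rfl⟩ := List.mem_map.mp hp
    have hcw2 : c ∈ w2.toList := (PySem.Set.mem_ofList _ _).mp hc
    have hkey := (maximum_keys words2 PySem.Dict.empty c).mpr (Or.inr ⟨w2, hw2, hcw2⟩)
    have hA := h c hkey
    rw [hget c] at hA
    have hle : (w2.toList.count c : Int)
        ≤ words2.foldl (fun a w2 => max a (w2.toList.count c : Int)) 0 :=
      ((foldl_max_le_iff words2 c 0 _).mp le_rfl).2 w2 hw2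
    exact le_trans hle hA
  · intro h c hc
    rw [hget c]
    apply (foldl_max_le_iff words2 c 0 _).mpr
    refine ⟨Int.natCast_nonneg _, fun w2 hw2 => ?_⟩
    by_cases hcw2 : c ∈ w2.toList
    · have hmem : (c, (w2.toList.count c : Int)) ∈ (PySem.Dict.counter w2.toList).items := by
        rw [PySem.Dict.items_counter]
        exact List.mem_map.mpr ⟨c, (PySem.Set.mem_ofList _ _).mpr hcw2, rfl⟩
      exact h (PySem.Dict.counter w2.toList) ⟨w2, hw2, rfl⟩ _ hmem
    · rw [List.count_eq_zero.mpr hcw2]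
      exact Int.natCast_nonneg _

-- ===== VERDICT (by name: the statement is the Claim_ definition above) =====
theorem ret_spec : Claim_equal_ret := by
  intro words1 words2 _
  unfold Spec_ret ret ret_alt
  apply PySem.List.foldl_congr_mem'
  intro w _ stack
  simp only []
  rw [cond_equiv w words2]
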